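-- pv_equiv track=rewrite | github.com/MemTensor/HaluMem | scripts/utils.py | _parse_conversation_to_messages
-- ===== SOURCE A (Python) =====
-- from typing import Dict, List, Any
--
-- def _parse_conversation_to_messages(conversation_text: str) -> List[Dict[str, str]]:
--     """
--     Parse dialogue text to standard LLM messages format
--
--     Args:
--         conversation_text: Dialogue text
--
--     Returns:
--         List of messages, each containing role and content
--     """
--     messages = []
--     current_role = None
--     current_content = []
--
--     lines = conversation_text.strip().split('\n')
--
--     for line in lines:
--         line = line.strip()
--         if not line:
--             continue
--
--         if line.startswith('User: '):
--             # Save previous message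
--             if current_role and current_content:
--                 messages.append({
--                     "role": current_role,
--                     "content": '\n'.join(current_content).strip()
--                 })
--
--             # Start new user message
--             current_role = "user"
--             current_content = [line[6:].strip()]
--
--         elif line.startswith('Assistant: '):
--             # Save previous message
--             if current_role and current_content:
--                 messages.append({
--                     "role": current_role,
--                     "content": '\n'.join(current_content).strip()
--                 })
--
--             # Start new assistant message
--             current_role = "assistant"
--             current_content = [line[11:].strip()]
--
--         else:
--             # Continue current message content
--             if current_role:
--                 current_content.append(line)
--
--     # Save last message
--     if current_role and current_content:
--         messages.append({
--             "role": current_role,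
--             "content": '\n'.join(current_content).strip()
--         })
--
--     return messages
-- ===== SOURCE B (Python) =====
-- def _role_of(line):
--     if line.startswith('User: '):
--         return 'user', line[6:].strip()
--     if line.startswith('Assistant: '):
--         return 'assistant', line[11:].strip()
--     return None
--
--
-- def _parse_conversation_to_messages(conversation_text: str):
--     # Staged: normalize the lines first (strip, drop empties), then segment the
--     # normalized line list into blocks, one per role-marker line, by scanning for
--     # the next marker; join each block once.
--     lines = [s for s in (ln.strip() for ln in conversation_text.strip().split('\n')) if s]
--     messages = []
--     i, n = 0, len(lines)
--     while i < n:
--         r = _role_of(lines[i])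
--         i += 1
--         if r is None:
--             continue
--         role, first = r
--         j = i
--         while j < n and _role_of(lines[j]) is None:
--             j += 1
--         messages.append({'role': role, 'content': '\n'.join([first] + lines[i:j]).strip()})
--         i = j
--     return messages
-- ===== Notes on version B (the rewrite author's own statement) =====
-- stated objective: alternative
-- what changed: Replaces A's single-pass accumulator (current_role/current_content with three duplicated flush blocks) by staged block segmentation: first normalize the line list (strip, drop empties), then an outer loop that, at each role-marker line, scans ahead for the next marker and emits the whole block at once.
import Mathlib
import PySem

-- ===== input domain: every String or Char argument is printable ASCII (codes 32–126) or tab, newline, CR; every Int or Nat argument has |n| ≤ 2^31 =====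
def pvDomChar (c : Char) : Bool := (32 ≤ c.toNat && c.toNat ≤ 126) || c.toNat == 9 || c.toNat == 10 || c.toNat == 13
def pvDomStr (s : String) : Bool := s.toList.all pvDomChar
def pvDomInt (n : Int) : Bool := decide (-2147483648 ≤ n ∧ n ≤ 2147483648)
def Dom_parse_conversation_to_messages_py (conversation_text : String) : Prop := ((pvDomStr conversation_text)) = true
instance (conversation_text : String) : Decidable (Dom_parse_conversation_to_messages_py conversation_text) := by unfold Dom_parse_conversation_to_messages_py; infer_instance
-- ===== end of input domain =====

-- B replaces A's single-pass accumulator (current_role/current_content, three duplicated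
-- flush blocks) by staged block segmentation: normalize the line list first (strip, drop
-- empties), then segment it into one block per role-marker line; same return value.

-- ===== PORT A =====
-- dict {"role": r, "content": c} as an association list
def pvMsg (r c : String) : List (String × String) := [("role", r), ("content", c)]

-- A's repeated "Save previous/last message" block:
-- if current_role and current_content: messages.append({...})
def pvSaveMessage (messages : List (List (String × String)))
    (current_role : Option String) (current_content : List String) :
    List (List (String × String)) :=
  match current_role with
  | some r => if current_content ≠ [] then
      messages ++ [pvMsg r (PySem.Str.strip (PySem.Str.join "\n" current_content))]
    else messages
  | none => messages

-- one iteration of A's for-loop over state (messages, current_role, current_content)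
def pvAStep (st : List (List (String × String)) × Option String × List String)
    (rawLine : String) : List (List (String × String)) × Option String × List String :=
  let line := PySem.Str.strip rawLine
  if line = "" then st
  else if PySem.Str.startswith line "User: " then
    (pvSaveMessage st.1 st.2.1 st.2.2, some "user",
      [PySem.Str.strip (PySem.Str.slice line (some 6) none)])
  else if PySem.Str.startswith line "Assistant: " then
    (pvSaveMessage st.1 st.2.1 st.2.2, some "assistant",
      [PySem.Str.strip (PySem.Str.slice line (some 11) none)])
  else
    match st.2.1 with
    | some _ => (st.1, st.2.1, st.2.2 ++ [line])
    | none => st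

def parse_conversation_to_messages_py (conversation_text : String) :
    List (List (String × String)) :=
  let st := ((PySem.Str.split? (PySem.Str.strip conversation_text) "\n").getD []).foldl
    pvAStep ([], none, [])
  pvSaveMessage st.1 st.2.1 st.2.2

-- ===== PORT B =====
-- _role_of: role + first content line of a marker line, None otherwise
def pvRoleOf (line : String) : Option (String × String) :=
  if PySem.Str.startswith line "User: " then
    some ("user", PySem.Str.strip (PySem.Str.slice line (some 6) none))
  else if PySem.Str.startswith line "Assistant: " then
    some ("assistant", PySem.Str.strip (PySem.Str.slice line (some 11) none))
  else none

-- the normalized line list: [s for s in (ln.strip() for ln in text.strip().split('\n')) if s]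
def pvLines (conversation_text : String) : List String :=
  (((PySem.Str.split? (PySem.Str.strip conversation_text) "\n").getD []).map
    PySem.Str.strip).filter (fun s => s != "")

-- Source B's outer while loop as recursion on the remaining suffix of `lines`; the inner
-- while (scan j to the next marker) and the slice lines[i:j] are takeWhile/dropWhile
def pvBlocks : List String → List (List (String × String))
  | [] => []
  | l :: ls =>
    match pvRoleOf l with
    | none => pvBlocks ls
    | some rf =>
      [("role", rf.1), ("content", PySem.Str.strip (PySem.Str.join "\n"
          (rf.2 :: ls.takeWhile (fun x => (pvRoleOf x).isNone))))]
        :: pvBlocks (ls.dropWhile (fun x => (pvRoleOf x).isNone))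
termination_by ls => ls.length
decreasing_by
  · simp
  · have := List.length_dropWhile_le (fun x => (pvRoleOf x).isNone) ls
    simp; omega

def parse_conversation_to_messages_py_alt (conversation_text : String) :
    List (List (String × String)) :=
  pvBlocks (pvLines conversation_text)

-- ===== PRECONDITION & SPEC =====
def Spec_parse_conversation_to_messages_py (conversation_text : String) (out : List (List (String × String))) : Prop := out = parse_conversation_to_messages_py_alt conversation_text
instance (conversation_text : String) (out : List (List (String × String))) : Decidable (Spec_parse_conversation_to_messages_py conversation_text out) := by unfold Spec_parse_conversation_to_messages_py; infer_instance

-- ===== CLAIM (what is proved, stated in full; the proofs are below) =====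
def Claim_equal_parse_conversation_to_messages_py : Prop := ∀ (conversation_text : String), Dom_parse_conversation_to_messages_py conversation_text → Spec_parse_conversation_to_messages_py conversation_text (parse_conversation_to_messages_py conversation_text)

-- ===== LEMMAS AND PROOFS =====
lemma pv_dw_idem {α : Type} (p : α → Bool) (l : List α) :
    (l.dropWhile p).dropWhile p = l.dropWhile p := by
  induction l with
  | nil => rfl
  | cons a t ih =>
    by_cases h : p a
    · simpa [h] using ih
    · simp [h]

lemma pv_dw_prefix {α : Type} (p : α → Bool) {l l' : List α} (h : l' <+: l)
    (hl : l.dropWhile p = l) : l'.dropWhile p = l' := by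
  cases l' with
  | nil => rfl
  | cons a t =>
    cases l with
    | nil => exact absurd (List.prefix_nil.mp h) (by simp)
    | cons b u =>
      have hab : a = b := by
        obtain ⟨r, hr⟩ := h
        simpa using congrArg (·.head?) hr
      subst hab
      by_cases hp : p a
      · exfalso
        rw [List.dropWhile_cons, if_pos hp] at hl
        have := List.length_dropWhile_le p u
        have := congrArg List.length hl
        simp at this; omega
      · simp [hp]

lemma pv_chars_strip_idem (s : List Char) :
    PySem.Chars.strip (PySem.Chars.strip s) = PySem.Chars.strip s := by
  have hpre : PySem.Chars.rstrip (PySem.Chars.lstrip s) <+: PySem.Chars.lstrip s := by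
    have hsfx : (PySem.Chars.rstrip (PySem.Chars.lstrip s)).reverse
        <:+ (PySem.Chars.lstrip s).reverse := by
      simpa [PySem.Chars.rstrip] using
        List.dropWhile_suffix (l := (PySem.Chars.lstrip s).reverse) (p := PySem.Chars.isspace)
    exact List.reverse_suffix.mp hsfx
  have hls : (PySem.Chars.lstrip s).dropWhile PySem.Chars.isspace = PySem.Chars.lstrip s :=
    pv_dw_idem _ _
  have h1 : PySem.Chars.lstrip (PySem.Chars.strip s) = PySem.Chars.strip s := by
    simpa [PySem.Chars.strip, PySem.Chars.lstrip] using pv_dw_prefix _ hpre hls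
  have h2 : PySem.Chars.rstrip (PySem.Chars.rstrip (PySem.Chars.lstrip s))
      = PySem.Chars.rstrip (PySem.Chars.lstrip s) := by
    simp [PySem.Chars.rstrip, pv_dw_idem]
  calc PySem.Chars.strip (PySem.Chars.strip s)
      = PySem.Chars.rstrip (PySem.Chars.lstrip (PySem.Chars.strip s)) := rfl
    _ = PySem.Chars.rstrip (PySem.Chars.strip s) := by rw [h1]
    _ = PySem.Chars.strip s := h2

lemma pv_strip_idem (s : String) : PySem.Str.strip (PySem.Str.strip s) = PySem.Str.strip s := by
  show String.ofList (PySem.Chars.strip (PySem.Str.strip s).toList) = PySem.Str.strip s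
  rw [PySem.Str.toList_strip, pv_chars_strip_idem]
  rfl

-- pvBlocks rewrite lemmas
lemma pvBlocks_nil : pvBlocks [] = [] := by rw [pvBlocks]

lemma pvBlocks_cons_none {l : String} (ls : List String) (h : pvRoleOf l = none) :
    pvBlocks (l :: ls) = pvBlocks ls := by rw [pvBlocks, h]

lemma pvBlocks_cons_some {l : String} (ls : List String) {r f : String}
    (h : pvRoleOf l = some (r, f)) :
    pvBlocks (l :: ls) =
      pvMsg r (PySem.Str.strip (PySem.Str.join "\n"
          (f :: ls.takeWhile (fun x => (pvRoleOf x).isNone))))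
        :: pvBlocks (ls.dropWhile (fun x => (pvRoleOf x).isNone)) := by
  rw [pvBlocks, h]; rfl

-- A's fold over the raw split lines equals its fold over the normalized line list
lemma pv_fold_filter (raws : List String)
    (st : List (List (String × String)) × Option String × List String) :
    raws.foldl pvAStep st
      = ((raws.map PySem.Str.strip).filter (fun s => s != "")).foldl pvAStep st := by
  induction raws generalizing st with
  | nil => rfl
  | cons r rs ih =>
    by_cases h : PySem.Str.strip r = ""
    · simp only [List.foldl_cons, List.map_cons, List.filter_cons, h]
      rw [show pvAStep st r = st by simp [pvAStep, h]]
      simpa using ih st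
    · simp only [List.foldl_cons, List.map_cons, List.filter_cons]
      rw [if_pos (by simpa using h), List.foldl_cons,
        show pvAStep st (PySem.Str.strip r) = pvAStep st r from by
          simp [pvAStep, pv_strip_idem]]
      exact ih (pvAStep st r)

lemma pv_mainSome (L : List String) (hG : ∀ l ∈ L, PySem.Str.strip l = l ∧ l ≠ "")
    (msgs : List (List (String × String))) (r : String) (cs : List String) (hcs : cs ≠ []) :
    (fun st => pvSaveMessage st.1 st.2.1 st.2.2) (L.foldl pvAStep (msgs, some r, cs))
      = msgs ++ (pvMsg r (PySem.Str.strip (PySem.Str.join "\n"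
            (cs ++ L.takeWhile (fun x => (pvRoleOf x).isNone))))
          :: pvBlocks (L.dropWhile (fun x => (pvRoleOf x).isNone))) := by
  induction L generalizing msgs r cs with
  | nil => simp [pvSaveMessage, hcs, pvBlocks_nil]
  | cons l L' ih =>
    obtain ⟨hstrip, hne⟩ := hG l (by simp)
    have hG' : ∀ x ∈ L', PySem.Str.strip x = x ∧ x ≠ "" := fun x hx => hG x (by simp [hx])
    by_cases hu : PySem.Str.startswith l "User: " = true
    · have hu' : PySem.Chars.startswith l.toList ['U','s','e','r',':',' '] = true := by
        simpa using hu
      have hrole : pvRoleOf l = some ("user", PySem.Str.strip (PySem.Str.slice l (some 6) none)) := by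
        simp [pvRoleOf, hu']
      have hstep : pvAStep (msgs, some r, cs) l
          = (msgs ++ [pvMsg r (PySem.Str.strip (PySem.Str.join "\n" cs))], some "user",
             [PySem.Str.strip (PySem.Str.slice l (some 6) none)]) := by
        simp only [pvAStep, hstrip]
        rw [if_neg hne]
        simp [hu', pvSaveMessage, hcs]
      rw [List.foldl_cons, hstep, ih hG' _ _ _ (by simp)]
      simp [hrole, pvBlocks_cons_some L' hrole]
    · have hu' : PySem.Chars.startswith l.toList ['U','s','e','r',':',' '] = false := by
        simpa using hu
      by_cases ha : PySem.Str.startswith l "Assistant: " = true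
      · have ha' : PySem.Chars.startswith l.toList
            ['A','s','s','i','s','t','a','n','t',':',' '] = true := by simpa using ha
        have hrole : pvRoleOf l = some ("assistant", PySem.Str.strip (PySem.Str.slice l (some 11) none)) := by
          simp [pvRoleOf, hu', ha']
        have hstep : pvAStep (msgs, some r, cs) l
            = (msgs ++ [pvMsg r (PySem.Str.strip (PySem.Str.join "\n" cs))], some "assistant",
               [PySem.Str.strip (PySem.Str.slice l (some 11) none)]) := by
          simp only [pvAStep, hstrip]
          rw [if_neg hne]
          simp [hu', ha', pvSaveMessage, hcs]
        rw [List.foldl_cons, hstep, ih hG' _ _ _ (by simp)]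
        simp [hrole, pvBlocks_cons_some L' hrole]
      · have ha' : PySem.Chars.startswith l.toList
            ['A','s','s','i','s','t','a','n','t',':',' '] = false := by simpa using ha
        have hrole : pvRoleOf l = none := by simp [pvRoleOf, hu', ha']
        have hstep : pvAStep (msgs, some r, cs) l = (msgs, some r, cs ++ [l]) := by
          simp only [pvAStep, hstrip]
          rw [if_neg hne]
          simp [hu', ha']
        rw [List.foldl_cons, hstep, ih hG' _ _ _ (by simp [hcs])]
        simp [hrole]

lemma pv_mainNone (L : List String) (hG : ∀ l ∈ L, PySem.Str.strip l = l ∧ l ≠ "")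
    (msgs : List (List (String × String))) :
    (fun st => pvSaveMessage st.1 st.2.1 st.2.2) (L.foldl pvAStep (msgs, none, []))
      = msgs ++ pvBlocks L := by
  induction L generalizing msgs with
  | nil => simp [pvSaveMessage, pvBlocks_nil]
  | cons l L' ih =>
    obtain ⟨hstrip, hne⟩ := hG l (by simp)
    have hG' : ∀ x ∈ L', PySem.Str.strip x = x ∧ x ≠ "" := fun x hx => hG x (by simp [hx])
    by_cases hu : PySem.Str.startswith l "User: " = true
    · have hu' : PySem.Chars.startswith l.toList ['U','s','e','r',':',' '] = true := by
        simpa using hu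
      have hrole : pvRoleOf l = some ("user", PySem.Str.strip (PySem.Str.slice l (some 6) none)) := by
        simp [pvRoleOf, hu']
      have hstep : pvAStep (msgs, none, []) l
          = (msgs, some "user", [PySem.Str.strip (PySem.Str.slice l (some 6) none)]) := by
        simp only [pvAStep, hstrip]
        rw [if_neg hne]
        simp [hu', pvSaveMessage]
      rw [List.foldl_cons, hstep, pv_mainSome L' hG' _ _ _ (by simp)]
      simp [pvBlocks_cons_some L' hrole]
    · have hu' : PySem.Chars.startswith l.toList ['U','s','e','r',':',' '] = false := by
        simpa using hu
      by_cases ha : PySem.Str.startswith l "Assistant: " = true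
      · have ha' : PySem.Chars.startswith l.toList
            ['A','s','s','i','s','t','a','n','t',':',' '] = true := by simpa using ha
        have hrole : pvRoleOf l = some ("assistant", PySem.Str.strip (PySem.Str.slice l (some 11) none)) := by
          simp [pvRoleOf, hu', ha']
        have hstep : pvAStep (msgs, none, []) l
            = (msgs, some "assistant", [PySem.Str.strip (PySem.Str.slice l (some 11) none)]) := by
          simp only [pvAStep, hstrip]
          rw [if_neg hne]
          simp [hu', ha', pvSaveMessage]
        rw [List.foldl_cons, hstep, pv_mainSome L' hG' _ _ _ (by simp)]
        simp [pvBlocks_cons_some L' hrole]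
      · have ha' : PySem.Chars.startswith l.toList
            ['A','s','s','i','s','t','a','n','t',':',' '] = false := by simpa using ha
        have hrole : pvRoleOf l = none := by simp [pvRoleOf, hu', ha']
        have hstep : pvAStep (msgs, none, []) l = (msgs, none, []) := by
          simp only [pvAStep, hstrip]
          rw [if_neg hne]
          simp [hu', ha']
        rw [List.foldl_cons, hstep, ih hG']
        rw [pvBlocks_cons_none L' hrole]

lemma pv_lines_good (t : String) :
    ∀ l ∈ pvLines t, PySem.Str.strip l = l ∧ l ≠ "" := by
  intro l hl
  unfold pvLines at hl
  rw [List.mem_filter] at hl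
  obtain ⟨hmem, hne⟩ := hl
  rw [List.mem_map] at hmem
  obtain ⟨x, _, hx⟩ := hmem
  refine ⟨?_, by simpa using hne⟩
  rw [← hx, pv_strip_idem]

-- ===== VERDICT (by name: the statement is the Claim_ definition above) =====
theorem parse_conversation_to_messages_py_spec : Claim_equal_parse_conversation_to_messages_py := by
  intro conversation_text _
  unfold Spec_parse_conversation_to_messages_py
  have e1 : parse_conversation_to_messages_py conversation_text
      = (fun st => pvSaveMessage st.1 st.2.1 st.2.2)
        (((PySem.Str.split? (PySem.Str.strip conversation_text) "\n").getD []).foldl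
          pvAStep ([], none, [])) := rfl
  have e2 : parse_conversation_to_messages_py_alt conversation_text
      = pvBlocks (pvLines conversation_text) := rfl
  rw [e1, pv_fold_filter, e2]
  simpa [pvLines] using
    pv_mainNone (pvLines conversation_text) (pv_lines_good conversation_text) []
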